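-- pv_equiv track=rewrite | github.com/MalamasKonstantinos/sublinear-algorithms-for-gap-edit-distance | SublinearAlgorithmForGapEditDistance.py | get_gcd_of_difference
-- ===== SOURCE A (Python) =====
-- import math
--
-- def get_gcd_of_difference(S, l, t):
--     temp_gcd = 0
--     first = True
--     for d1 in range(l):
--         for d2 in range(l):
--             if first and S[d1] and S[d2] and d1 > d2:
--                 temp_gcd = (d1 - t) - (d2 - t)
--                 first = False
--             elif not first and S[d1] and S[d2] and d1 > d2:
--                 temp_gcd = math.gcd(temp_gcd, (d1 - t) - (d2 - t))
--     return temp_gcd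
-- ===== SOURCE B (Python) =====
-- import math
--
-- def get_gcd_of_difference(S, l, t):
--     g = 0
--     first = -1
--     for i in range(l):
--         if S[i]:
--             if first < 0:
--                 first = i
--             else:
--                 g = math.gcd(g, i - first)
--     return g
-- ===== Notes on version B (the rewrite author's own statement) =====
-- stated objective: faster
-- what changed: A's O(l^2) double loop taking the gcd over every pair of truthy indices is replaced by a single O(l) pass taking the gcd of (i - first truthy index), which has the same gcd.
import Mathlib
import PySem

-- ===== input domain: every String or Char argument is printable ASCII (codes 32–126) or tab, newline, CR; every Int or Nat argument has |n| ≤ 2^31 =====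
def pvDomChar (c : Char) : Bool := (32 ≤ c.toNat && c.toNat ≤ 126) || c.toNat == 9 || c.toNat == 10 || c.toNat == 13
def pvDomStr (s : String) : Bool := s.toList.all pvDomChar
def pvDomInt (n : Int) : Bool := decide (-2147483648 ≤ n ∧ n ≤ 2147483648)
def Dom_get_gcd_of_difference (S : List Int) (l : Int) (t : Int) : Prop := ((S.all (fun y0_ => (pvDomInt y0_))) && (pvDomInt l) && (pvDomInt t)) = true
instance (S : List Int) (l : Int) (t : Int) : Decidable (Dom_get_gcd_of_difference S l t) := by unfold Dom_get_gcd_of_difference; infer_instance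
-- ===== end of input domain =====

-- B replaces A's double loop over all truthy index pairs by a single pass
-- taking the gcd of (i - first truthy index).

-- ===== PORT A =====
-- literal transliteration of A's nested range loops with the (temp_gcd, first) state
def get_gcd_of_difference (S : List Int) (l : Int) (t : Int) : Int :=
  ((PySem.List.pyRange 0 l 1).foldl (fun (st : Int × Bool) d1 =>
      (PySem.List.pyRange 0 l 1).foldl (fun (st : Int × Bool) d2 =>
        if st.2 = true ∧ PySem.List.pyGetD S d1 0 ≠ 0 ∧ PySem.List.pyGetD S d2 0 ≠ 0 ∧ d1 > d2 then
          ((d1 - t) - (d2 - t), false)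
        else if st.2 = false ∧ PySem.List.pyGetD S d1 0 ≠ 0 ∧ PySem.List.pyGetD S d2 0 ≠ 0 ∧ d1 > d2 then
          (((Int.gcd st.1 ((d1 - t) - (d2 - t)) : Nat) : Int), false)
        else st) st) ((0 : Int), true)).1

-- ===== PORT B =====
-- literal transliteration of Source B: one pass, state (g, first) with sentinel first = -1
def get_gcd_of_difference_alt (S : List Int) (l : Int) (t : Int) : Int :=
  ((PySem.List.pyRange 0 l 1).foldl (fun (st : Int × Int) i =>
      if PySem.List.pyGetD S i 0 ≠ 0 then
        if st.2 < 0 then (st.1, i)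
        else (((Int.gcd st.1 (i - st.2) : Nat) : Int), st.2)
      else st) ((0 : Int), (-1 : Int))).1

-- ===== PRECONDITION & SPEC =====
-- Pre_ excludes exactly the inputs where Python A raises IndexError (l > len(S): S[d1] fails).
def Pre_get_gcd_of_difference (S : List Int) (l : Int) (t : Int) : Prop := l ≤ (S.length : Int)
instance (S : List Int) (l : Int) (t : Int) : Decidable (Pre_get_gcd_of_difference S l t) := by unfold Pre_get_gcd_of_difference; infer_instance
def pvWitness_get_gcd_of_difference : List Int × Int × Int := ([1, 0, 1, 1], 4, 2)

def Spec_get_gcd_of_difference (S : List Int) (l : Int) (t : Int) (out : Int) : Prop := out = get_gcd_of_difference_alt S l t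
instance (S : List Int) (l : Int) (t : Int) (out : Int) : Decidable (Spec_get_gcd_of_difference S l t out) := by unfold Spec_get_gcd_of_difference; infer_instance

-- ===== CLAIM (what is proved, stated in full; the proofs are below) =====
def Claim_equal_get_gcd_of_difference : Prop := ∀ (S : List Int) (l : Int) (t : Int), Dom_get_gcd_of_difference S l t → Pre_get_gcd_of_difference S l t → Spec_get_gcd_of_difference S l t (get_gcd_of_difference S l t)

-- ===== LEMMAS AND PROOFS =====

-- gcd step on Int, as math.gcd produces (nonnegative result)
def gI (g v : Int) : Int := ((Int.gcd g v : Nat) : Int)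
-- plain gcd fold
def F (a : Int) (L : List Int) : Int := L.foldl gI a
-- A's flagged step
def fstep (st : Int × Bool) (v : Int) : Int × Bool := if st.2 then (v, false) else (gI st.1 v, false)
-- the two loop bodies, named for the proofs
def abody (S : List Int) (t d1 : Int) (st : Int × Bool) (d2 : Int) : Int × Bool :=
  if st.2 = true ∧ PySem.List.pyGetD S d1 0 ≠ 0 ∧ PySem.List.pyGetD S d2 0 ≠ 0 ∧ d1 > d2 then
    ((d1 - t) - (d2 - t), false)
  else if st.2 = false ∧ PySem.List.pyGetD S d1 0 ≠ 0 ∧ PySem.List.pyGetD S d2 0 ≠ 0 ∧ d1 > d2 then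
    (((Int.gcd st.1 ((d1 - t) - (d2 - t)) : Nat) : Int), false)
  else st

def bbody (S : List Int) (st : Int × Int) (i : Int) : Int × Int :=
  if PySem.List.pyGetD S i 0 ≠ 0 then
    if st.2 < 0 then (st.1, i)
    else (((Int.gcd st.1 (i - st.2) : Nat) : Int), st.2)
  else st

-- the truthiness test, as a Bool
def p (S : List Int) (i : Int) : Bool := decide (PySem.List.pyGetD S i 0 ≠ 0)

theorem gI_dvd_left (a v : Int) : gI a v ∣ a := Int.gcd_dvd_left a v
theorem gI_dvd_right (a v : Int) : gI a v ∣ v := Int.gcd_dvd_right a v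
theorem dvd_gI (d a v : Int) (ha : d ∣ a) (hv : d ∣ v) : d ∣ gI a v := by
  unfold gI
  exact Int.natAbs_dvd.1 (Int.natCast_dvd_natCast.2 (Nat.dvd_gcd
    (Int.natAbs_dvd_natAbs.2 ha) (Int.natAbs_dvd_natAbs.2 hv)))

theorem F_nonneg (a : Int) (L : List Int) (h : 0 ≤ a) : 0 ≤ F a L := by
  induction L generalizing a with
  | nil => exact h
  | cons v L ih => exact ih _ (Int.natCast_nonneg _)

theorem F_dvd_acc (a : Int) (L : List Int) : F a L ∣ a := by
  induction L generalizing a with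
  | nil => exact dvd_refl a
  | cons v L ih => exact dvd_trans (ih (gI a v)) (gI_dvd_left a v)

theorem F_dvd_mem (a : Int) (L : List Int) (v : Int) (hv : v ∈ L) : F a L ∣ v := by
  induction L generalizing a with
  | nil => cases hv
  | cons w L ih =>
    rcases List.mem_cons.1 hv with h | h
    · rw [h]; exact dvd_trans (F_dvd_acc (gI a w) L) (gI_dvd_right a w)
    · exact ih _ h

theorem dvd_F (d a : Int) (L : List Int) (ha : d ∣ a) (hL : ∀ v ∈ L, d ∣ v) : d ∣ F a L := by
  induction L generalizing a with
  | nil => exact ha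
  | cons v L ih =>
    exact ih _ (dvd_gI d a v ha (hL v (List.mem_cons_self ..))) (fun w hw => hL w (List.mem_cons_of_mem _ hw))

-- fold over flatMap = fold of the inner folds
theorem foldl_flatMap' {α β γ : Type} (f : α → List β) (g : γ → β → γ) (L : List α) (x : γ) :
    (L.flatMap f).foldl g x = L.foldl (fun x a => (f a).foldl g x) x := by
  induction L generalizing x with
  | nil => rfl
  | cons a L ih => simp [List.flatMap_cons, List.foldl_append, ih]

-- flagged fold with flag already false is the plain fold
theorem foldl_fstep_false (L : List Int) (g : Int) :
    L.foldl fstep (g, false) = (F g L, false) := by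
  induction L generalizing g with
  | nil => rfl
  | cons v L ih => simpa [fstep, F] using ih (gI g v)

-- flag elimination: on a list of nonnegative values the flag is redundant
theorem foldl_fstep_true (L : List Int) (h : ∀ v ∈ L, 0 ≤ v) :
    (L.foldl fstep (0, true)).1 = F 0 L := by
  cases L with
  | nil => rfl
  | cons v L =>
    have hv : 0 ≤ v := h v (List.mem_cons_self ..)
    have hg : gI 0 v = v := by
      simp [gI, Int.gcd]
      omega
    simp [fstep, foldl_fstep_false, F, hg]

-- A's inner loop is the flagged gcd fold over the admissible pairs' differences
theorem A_inner (S : List Int) (t d1 : Int) (L : List Int) (st : Int × Bool) :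
    L.foldl (abody S t d1) st
      = (L.filterMap (fun d2 =>
          if PySem.List.pyGetD S d1 0 ≠ 0 ∧ PySem.List.pyGetD S d2 0 ≠ 0 ∧ d1 > d2 then
            some ((d1 - t) - (d2 - t)) else none)).foldl fstep st := by
  induction L generalizing st with
  | nil => rfl
  | cons d2 L ih =>
    by_cases hC : PySem.List.pyGetD S d1 0 ≠ 0 ∧ PySem.List.pyGetD S d2 0 ≠ 0 ∧ d1 > d2
    · have hb : abody S t d1 st d2 = fstep st ((d1 - t) - (d2 - t)) := by
        rcases st with ⟨g, fl⟩
        cases fl <;> simp [abody, fstep, hC, gI]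
      simp only [List.foldl_cons, List.filterMap_cons, if_pos hC, hb]
      exact ih _
    · have hb : abody S t d1 st d2 = st := by
        simp [abody, hC]
      simp only [List.foldl_cons, List.filterMap_cons, if_neg hC, hb]
      exact ih _

-- B's loop after the first truthy index f has been found
theorem B_found (S : List Int) (L : List Int) (g f : Int) (hf : 0 ≤ f) :
    L.foldl (bbody S) (g, f)
      = (F g ((L.filter (p S)).map (fun i => i - f)), f) := by
  induction L generalizing g with
  | nil => rfl
  | cons i L ih =>
    by_cases hq : PySem.List.pyGetD S i 0 ≠ 0
    · have hnf : ¬ f < 0 := by omega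
      have hp : p S i = true := by simp [p, hq]
      simp only [List.foldl_cons, bbody, if_pos hq, if_neg hnf, List.filter_cons_of_pos hp,
        List.map_cons, F, List.foldl_cons]
      exact ih _
    · have hp : ¬ p S i = true := by simp [p, hq]
      simp only [List.foldl_cons, bbody, if_neg hq, List.filter_cons_of_neg hp]
      exact ih g

-- B's whole loop, in terms of the filtered truthy-index list
theorem B_whole (S : List Int) (L : List Int) (h : ∀ x ∈ L, 0 ≤ x) :
    (L.foldl (bbody S) (0, -1)).1
      = (match L.filter (p S) with
         | [] => (0 : Int)
         | f :: rest => F 0 (rest.map (fun i => i - f))) := by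
  induction L with
  | nil => rfl
  | cons i L ih =>
    by_cases hq : PySem.List.pyGetD S i 0 ≠ 0
    · have hp : p S i = true := by simp [p, hq]
      have hi : (0 : Int) ≤ i := h i (List.mem_cons_self ..)
      simp only [List.foldl_cons, bbody, if_pos hq, if_pos (by omega : (-1 : Int) < 0),
        List.filter_cons_of_pos hp]
      rw [B_found S L 0 i hi]
    · have hp : ¬ p S i = true := by simp [p, hq]
      simp only [List.foldl_cons, bbody, if_neg hq, List.filter_cons_of_neg hp]
      exact ih (fun x hx => h x (List.mem_cons_of_mem _ hx))

theorem main_eq (S : List Int) (l t : Int) :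
    get_gcd_of_difference S l t = get_gcd_of_difference_alt S l t := by
  classical
  set R := PySem.List.pyRange 0 l 1 with hR
  have hRnn : ∀ x ∈ R, (0 : Int) ≤ x := by
    intro x hx
    have := (PySem.List.mem_pyRange_one).1 hx
    omega
  -- the pairwise-difference list A folds over
  set P : List Int := R.flatMap (fun d1 => R.filterMap (fun d2 =>
      if PySem.List.pyGetD S d1 0 ≠ 0 ∧ PySem.List.pyGetD S d2 0 ≠ 0 ∧ d1 > d2 then
        some ((d1 - t) - (d2 - t)) else none)) with hP
  have memP : ∀ v, v ∈ P ↔ ∃ d1, d1 ∈ R ∧ ∃ d2, d2 ∈ R ∧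
      (PySem.List.pyGetD S d1 0 ≠ 0 ∧ PySem.List.pyGetD S d2 0 ≠ 0 ∧ d2 < d1) ∧ v = d1 - d2 := by
    intro v
    rw [hP]
    simp only [List.mem_flatMap, List.mem_filterMap]
    constructor
    · rintro ⟨d1, h1, d2, h2, hif⟩
      split_ifs at hif with hc
      · refine ⟨d1, h1, d2, h2, ⟨hc.1, hc.2.1, hc.2.2⟩, ?_⟩
        injection hif with h
        omega
    · rintro ⟨d1, h1, d2, h2, ⟨c1, c2, c3⟩, rfl⟩
      refine ⟨d1, h1, d2, h2, ?_⟩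
      rw [if_pos ⟨c1, c2, c3⟩]
      congr 1
      ring
  have hA : get_gcd_of_difference S l t = F 0 P := by
    have h1 : get_gcd_of_difference S l t
        = (R.foldl (fun st d1 => R.foldl (abody S t d1) st) ((0 : Int), true)).1 := rfl
    rw [h1]
    have h2 : (R.foldl (fun st d1 => R.foldl (abody S t d1) st) ((0 : Int), true))
        = P.foldl fstep ((0 : Int), true) := by
      rw [hP, foldl_flatMap']
      exact PySem.List.foldl_congr_mem R _ _ _ (fun st d1 _ => A_inner S t d1 R st)
    rw [h2]
    apply foldl_fstep_true
    intro v hv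
    obtain ⟨d1, -, d2, -, ⟨-, -, hlt⟩, rfl⟩ := (memP v).1 hv
    omega
  have hB : get_gcd_of_difference_alt S l t
      = (match R.filter (p S) with
         | [] => (0 : Int)
         | f :: rest => F 0 (rest.map (fun i => i - f))) := by
    have h1 : get_gcd_of_difference_alt S l t = (R.foldl (bbody S) (0, -1)).1 := rfl
    rw [h1, B_whole S R hRnn]
  rw [hA, hB]
  have memT : ∀ d, d ∈ R.filter (p S) ↔ d ∈ R ∧ PySem.List.pyGetD S d 0 ≠ 0 := by
    intro d; simp [List.mem_filter, p]
  cases hT : R.filter (p S) with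
  | nil =>
    have hPnil : P = [] := by
      apply List.eq_nil_iff_forall_not_mem.2
      intro v hv
      obtain ⟨d1, h1, d2, -, ⟨hq1, -, -⟩, -⟩ := (memP v).1 hv
      have : d1 ∈ R.filter (p S) := (memT d1).2 ⟨h1, hq1⟩
      rw [hT] at this
      cases this
    rw [hPnil]
    rfl
  | cons f rest =>
    have hpw : (R.filter (p S)).Pairwise (· < ·) :=
      (PySem.List.pairwise_lt_pyRange_one 0 l).filter _
    rw [hT] at hpw
    have hfrest : ∀ i ∈ rest, f < i := (List.pairwise_cons.1 hpw).1
    have hfT : f ∈ R ∧ PySem.List.pyGetD S f 0 ≠ 0 :=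
      (memT f).1 (by rw [hT]; exact List.mem_cons_self ..)
    have hrT : ∀ i ∈ rest, i ∈ R ∧ PySem.List.pyGetD S i 0 ≠ 0 := by
      intro i hi
      exact (memT i).1 (by rw [hT]; exact List.mem_cons_of_mem _ hi)
    -- every first-difference is a pairwise difference
    have hQP : ∀ x ∈ rest.map (fun i => i - f), x ∈ P := by
      intro x hx
      obtain ⟨i, hi, rfl⟩ := List.mem_map.1 hx
      exact (memP _).2 ⟨i, (hrT i hi).1, f, hfT.1, ⟨(hrT i hi).2, hfT.2, hfrest i hi⟩, rfl⟩
    apply Int.dvd_antisymm (F_nonneg _ _ le_rfl) (F_nonneg _ _ le_rfl)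
    · -- F 0 P ∣ F 0 Q
      exact dvd_F _ _ _ (dvd_zero _) (fun x hx => F_dvd_mem _ _ _ (hQP x hx))
    · -- F 0 Q ∣ F 0 P
      apply dvd_F _ _ _ (dvd_zero _)
      intro v hv
      obtain ⟨d1, h1, d2, h2, ⟨hq1, hq2, hlt⟩, rfl⟩ := (memP v).1 hv
      have hd1 : d1 ∈ f :: rest := by rw [← hT]; exact (memT d1).2 ⟨h1, hq1⟩
      have hd2 : d2 ∈ f :: rest := by rw [← hT]; exact (memT d2).2 ⟨h2, hq2⟩
      rcases List.mem_cons.1 hd1 with he1 | hd1 <;> rcases List.mem_cons.1 hd2 with he2 | hd2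
      · omega
      · exact absurd (hfrest d2 hd2) (by omega)
      · rw [he2]
        exact F_dvd_mem _ _ _ (List.mem_map.2 ⟨d1, hd1, rfl⟩)
      · have k1 : F 0 (rest.map (fun i => i - f)) ∣ d1 - f :=
          F_dvd_mem _ _ _ (List.mem_map.2 ⟨d1, hd1, rfl⟩)
        have k2 : F 0 (rest.map (fun i => i - f)) ∣ d2 - f :=
          F_dvd_mem _ _ _ (List.mem_map.2 ⟨d2, hd2, rfl⟩)
        have he : d1 - d2 = (d1 - f) - (d2 - f) := by ring
        rw [he]
        exact dvd_sub k1 k2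

-- ===== VERDICT (by name: the statement is the Claim_ definition above) =====
theorem get_gcd_of_difference_spec : Claim_equal_get_gcd_of_difference := by
  intro S l t _ _
  exact main_eq S l t
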